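-- pv_equiv track=rewrite | github.com/Lcoderfit/Introduction-to-algotithms | PythonLeetcode/BinarySearch/1351. 统计有序矩阵中的负数.py | binary_search_negatives
-- ===== SOURCE A (Python) =====
-- from typing import List
--
-- def binary_search_negatives(nums: List[int], pos: int) -> int:
--     i, j = pos, len(nums) - 1
--     while i <= j:
--         mid = (i + j) // 2
--         if nums[mid] < 0:
--             j = mid - 1
--         else:
--             i = mid + 1
--     return i
-- ===== SOURCE B (Python) =====
-- def binary_search_negatives(nums, pos):
--     # Recursive divide-and-conquer over (window start, window size)
--     # instead of A's while-loop over (i, j) endpoints.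
--     def go(lo, n):
--         if n <= 0:
--             return lo
--         k = (n - 1) // 2  # offset of the probe within the window
--         if nums[lo + k] < 0:
--             return go(lo, k)
--         return go(lo + k + 1, n - k - 1)
--     return go(pos, len(nums) - pos)
-- ===== Notes on version B (the rewrite author's own statement) =====
-- stated objective: alternative
-- what changed: A's imperative while-loop over endpoint state (i, j) is replaced by a recursive divide-and-conquer helper over (window start, window size) that probes offset (n-1)//2 inside the window; same probe sequence, different decomposition.
-- outside the precondition, e.g. on binary_search_negatives([5], -2): A returns 1, B returns 1
import Mathlib
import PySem

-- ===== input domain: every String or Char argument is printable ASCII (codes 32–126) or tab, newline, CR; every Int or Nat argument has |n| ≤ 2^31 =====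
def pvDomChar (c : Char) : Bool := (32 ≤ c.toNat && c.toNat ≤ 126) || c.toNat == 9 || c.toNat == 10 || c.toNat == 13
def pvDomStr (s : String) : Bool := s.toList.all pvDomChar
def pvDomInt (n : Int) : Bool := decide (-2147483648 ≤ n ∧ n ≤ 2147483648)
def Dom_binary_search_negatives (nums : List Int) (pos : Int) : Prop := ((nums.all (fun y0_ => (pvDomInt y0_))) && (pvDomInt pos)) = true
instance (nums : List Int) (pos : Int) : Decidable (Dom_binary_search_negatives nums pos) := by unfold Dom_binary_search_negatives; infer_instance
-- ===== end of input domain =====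

-- B rewrites A's while-loop over endpoints (i, j) as a recursive divide-and-conquer
-- over (window start, window size) with the same probe sequence (objective: alternative).

-- ===== PORT A =====
-- while i <= j: mid = (i+j)//2; if nums[mid] < 0: j = mid-1 else: i = mid+1; return i
-- (nums[mid] is ported with pyGetD; under Pre_ every probed index is in range, so it is exact)
def pvLoopA (nums : List Int) (i j : Int) : Int :=
  if h : i ≤ j then
    if PySem.List.pyGetD nums (PySem.Int.floordiv (i + j) 2) 0 < 0 then
      pvLoopA nums i (PySem.Int.floordiv (i + j) 2 - 1)
    else
      pvLoopA nums (PySem.Int.floordiv (i + j) 2 + 1) j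
  else i
termination_by (j + 1 - i).toNat
decreasing_by
  · obtain ⟨h1, h2⟩ := PySem.Int.floordiv_two_mid_bounds h; omega
  · obtain ⟨h1, h2⟩ := PySem.Int.floordiv_two_mid_bounds h; omega

def binary_search_negatives (nums : List Int) (pos : Int) : Int :=
  pvLoopA nums pos ((nums.length : Int) - 1)

-- ===== PORT B =====
-- def go(lo, n): if n <= 0: return lo; k = (n-1)//2; go(lo, k) if nums[lo+k] < 0 else go(lo+k+1, n-k-1)
def pvGoB (nums : List Int) (lo n : Int) : Int :=
  if hn : n ≤ 0 then lo
  else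
    if PySem.List.pyGetD nums (lo + PySem.Int.floordiv (n - 1) 2) 0 < 0 then
      pvGoB nums lo (PySem.Int.floordiv (n - 1) 2)
    else
      pvGoB nums (lo + PySem.Int.floordiv (n - 1) 2 + 1) (n - PySem.Int.floordiv (n - 1) 2 - 1)
termination_by n.toNat
decreasing_by
  · have hb := PySem.Int.floordiv_two_mid_bounds (lo := 0) (hi := n - 1) (by omega)
    rw [zero_add] at hb; omega
  · have hb := PySem.Int.floordiv_two_mid_bounds (lo := 0) (hi := n - 1) (by omega)
    rw [zero_add] at hb; omega

def binary_search_negatives_alt (nums : List Int) (pos : Int) : Int :=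
  pvGoB nums pos ((nums.length : Int) - pos)

-- ===== PRECONDITION & SPEC =====
-- Pre_ excludes pos < -len(nums): there the binary-search probe index can fall below
-- -len(nums), where Python raises IndexError (B probes the same indices and raises too);
-- on the excluded inputs where A happens to return, B returns the same value via the
-- same negative-index wraparound.
def Pre_binary_search_negatives (nums : List Int) (pos : Int) : Prop :=
  -(nums.length : Int) ≤ pos
instance (nums : List Int) (pos : Int) : Decidable (Pre_binary_search_negatives nums pos) := by unfold Pre_binary_search_negatives; infer_instance

def pvWitness_binary_search_negatives : List Int × Int := ([3, -1, -2], 0)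

def Spec_binary_search_negatives (nums : List Int) (pos : Int) (out : Int) : Prop := out = binary_search_negatives_alt nums pos
instance (nums : List Int) (pos : Int) (out : Int) : Decidable (Spec_binary_search_negatives nums pos out) := by unfold Spec_binary_search_negatives; infer_instance

-- ===== CLAIM (what is proved, stated in full; the proofs are below) =====
def Claim_equal_binary_search_negatives : Prop := ∀ (nums : List Int) (pos : Int), Dom_binary_search_negatives nums pos → Pre_binary_search_negatives nums pos → Spec_binary_search_negatives nums pos (binary_search_negatives nums pos)

-- ===== LEMMAS AND PROOFS =====

-- (i + j) // 2 = i + (j - i) // 2  (shift the midpoint to window-offset form)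
theorem pv_mid_shift (i j : Int) :
    PySem.Int.floordiv (i + j) 2 = i + PySem.Int.floordiv (j - i) 2 := by
  have hd := (PySem.Int.floordiv_eq_iff_of_pos (by norm_num : (0:Int) < 2)).mp
    (rfl : PySem.Int.floordiv (j - i) 2 = PySem.Int.floordiv (j - i) 2)
  rw [PySem.Int.floordiv_eq_iff_of_pos (by norm_num : (0:Int) < 2)]
  omega

-- the loop over (i, j) equals the recursion over (i, j + 1 - i)
theorem pv_loop_eq_go (nums : List Int) (i j : Int) :
    pvLoopA nums i j = pvGoB nums i (j + 1 - i) := by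
  generalize hm : (j + 1 - i).toNat = m
  induction m using Nat.strong_induction_on generalizing i j with
  | _ m ih =>
    rw [pvLoopA, pvGoB]
    by_cases h : i ≤ j
    · rw [dif_pos h, dif_neg (by omega : ¬ j + 1 - i ≤ 0)]
      obtain ⟨h1, h2⟩ := PySem.Int.floordiv_two_mid_bounds h
      have hk : j + 1 - i - 1 = j - i := by ring
      have hmid := pv_mid_shift i j
      rw [hk, ← hmid]
      by_cases hneg : PySem.List.pyGetD nums (PySem.Int.floordiv (i + j) 2) 0 < 0
      · rw [if_pos hneg, if_pos hneg]
        have := ih ((PySem.Int.floordiv (i + j) 2 - 1) + 1 - i).toNat (by omega)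
          i (PySem.Int.floordiv (i + j) 2 - 1) rfl
        rw [this]
        congr 1
        omega
      · rw [if_neg hneg, if_neg hneg]
        have := ih (j + 1 - (PySem.Int.floordiv (i + j) 2 + 1)).toNat (by omega)
          (PySem.Int.floordiv (i + j) 2 + 1) j rfl
        rw [this]
        congr 1 <;> omega
    · rw [dif_neg h, dif_pos (by omega : j + 1 - i ≤ 0)]

-- ===== VERDICT (by name: the statement is the Claim_ definition above) =====
theorem binary_search_negatives_spec : Claim_equal_binary_search_negatives := by
  intro nums pos _ _
  unfold Spec_binary_search_negatives binary_search_negatives binary_search_negatives_alt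
  rw [pv_loop_eq_go]
  congr 1
  ring
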